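-- pv_equiv track=rewrite | github.com/miliar/Code_Jam_Webscraper | solutions_python/solutions_year15_round0_nr1/555.py | solve
-- ===== SOURCE A (Python) =====
-- def solve(s):
-- 	standing = 0
-- 	need = 0
--
-- 	for (i, Si) in enumerate(s):
-- 		if Si > 0:
-- 			if standing >= i: # Are there enough people standing already?
-- 				standing += Si
-- 			else: # We need to invite more.
-- 				need += i - standing
-- 				standing += Si + (i - standing)
--
-- 	return need
-- ===== SOURCE B (Python) =====
-- def solve(s):
--     # staged pipeline: prefix sums of positive groups, then max deficit
--     prefix = [0]
--     for x in s:
--         prefix.append(prefix[-1] + (x if x > 0 else 0))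
--     deficits = [i - p for i, (x, p) in enumerate(zip(s, prefix)) if x > 0]
--     return max([0] + deficits)
-- ===== Notes on version B (the rewrite author's own statement) =====
-- stated objective: alternative
-- what changed: B replaces A's one-pass stateful catch-up simulation (standing crowd, incremental 'need') with a staged pipeline: a prefix-sum list of positive group sizes, a comprehension of deficits i - prefix[i], and a final max.
import Mathlib
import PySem

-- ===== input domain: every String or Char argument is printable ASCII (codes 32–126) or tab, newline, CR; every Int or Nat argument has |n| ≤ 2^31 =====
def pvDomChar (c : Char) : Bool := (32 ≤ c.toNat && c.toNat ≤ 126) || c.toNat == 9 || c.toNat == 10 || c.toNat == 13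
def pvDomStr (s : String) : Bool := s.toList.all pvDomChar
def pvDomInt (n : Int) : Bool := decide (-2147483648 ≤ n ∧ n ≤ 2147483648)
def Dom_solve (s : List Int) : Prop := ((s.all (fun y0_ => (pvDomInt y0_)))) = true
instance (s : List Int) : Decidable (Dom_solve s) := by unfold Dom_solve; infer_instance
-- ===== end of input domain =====

-- B replaces A's stateful catch-up simulation with a staged pipeline: prefix sums of
-- positive group sizes, a list of deficits i - prefix[i], and a final max; alternative decomposition, same cost.

-- ===== PORT A =====
-- the for-loop of A: state (standing, need), one step per (i, Si) of enumerate(s)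
def solveLoopA : List (Int × Int) → Int × Int → Int × Int
  | [], st => st
  | (i, Si) :: rest, (standing, need) =>
      solveLoopA rest
        (if Si > 0 then
          (if standing ≥ i then (standing + Si, need)
           else (standing + Si + (i - standing), need + (i - standing)))
         else (standing, need))

def solve (s : List Int) : Int :=
  (solveLoopA (PySem.List.enumerate s 0) (0, 0)).2

-- ===== PORT B =====
-- the prefix loop of B: appending prefix[-1] + (x if x > 0 else 0) for each x
def buildPrefix : List Int → Int → List Int
  | [], _ => []
  | x :: rest, last =>
      let nxt := last + (if x > 0 then x else 0)
      nxt :: buildPrefix rest nxt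

def solve_alt (s : List Int) : Int :=
  let pfx := 0 :: buildPrefix s 0
  let deficits := (PySem.List.enumerate (s.zip pfx) 0).filterMap
      (fun p => if p.2.1 > 0 then some (p.1 - p.2.2) else none)
  List.foldl max 0 deficits

-- ===== PRECONDITION & SPEC =====
def Spec_solve (s : List Int) (out : Int) : Prop := out = solve_alt s
instance (s : List Int) (out : Int) : Decidable (Spec_solve s out) := by unfold Spec_solve; infer_instance

-- ===== CLAIM (what is proved, stated in full; the proofs are below) =====
def Claim_equal_solve : Prop := ∀ (s : List Int), Dom_solve s → Spec_solve s (solve s)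

-- ===== LEMMAS AND PROOFS =====

-- A's loop, expressed against B's pipeline: with standing = total + ans and need = ans,
-- the final 'need' is the running max of 'ans' and the deficits built from prefix totals.
theorem loopA_eq_pipe (s : List Int) :
    ∀ (i0 total ans : Int),
      (solveLoopA (PySem.List.enumerate s i0) (total + ans, ans)).2
        = List.foldl max ans
            ((PySem.List.enumerate (s.zip (total :: buildPrefix s total)) i0).filterMap
              (fun p => if p.2.1 > 0 then some (p.1 - p.2.2) else none)) := by
  induction s with
  | nil => intro i0 total ans; rfl
  | cons x rest ih =>
      intro i0 total ans
      simp only [buildPrefix, List.zip_cons_cons, PySem.List.enumerate_cons, solveLoopA,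
        List.filterMap_cons]
      by_cases hpos : x > 0
      · simp only [if_pos hpos, List.foldl_cons]
        by_cases hst : total + ans ≥ i0
        · have hmax : max ans (i0 - total) = ans := by omega
          simp only [if_pos hst, hmax]
          have h1 : total + ans + x = (total + x) + ans := by ring
          rw [h1]; exact ih (i0 + 1) (total + x) ans
        · have hmax : max ans (i0 - total) = i0 - total := by omega
          simp only [if_neg hst, hmax]
          have h1 : total + ans + x + (i0 - (total + ans)) = (total + x) + (i0 - total) := by ring
          have h2 : ans + (i0 - (total + ans)) = i0 - total := by ring
          rw [h1, h2]; exact ih (i0 + 1) (total + x) (i0 - total)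
      · simp only [if_neg hpos, add_zero]
        exact ih (i0 + 1) total ans

-- ===== VERDICT (by name: the statement is the Claim_ definition above) =====
theorem solve_spec : Claim_equal_solve := by
  intro s _
  show solve s = solve_alt s
  have := loopA_eq_pipe s 0 0 0
  simpa [solve, solve_alt] using this
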